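-- pv_equiv track=rewrite | github.com/daniel-reich/ubiquitous-fiesta | Fm7ap2w3exqunF9aJ_19.py | count_lone_ones
-- ===== SOURCE A (Python) =====
-- def count_lone_ones(n):
--   x=str(n)
--   a=[]
--   count=0
--   for i in x:
--     a.append(int(i))
--   a.append(0)
--   for i in range(len(a)-1):
--     if a[i]==1 and a[i+1]!=1 and a[i-1]!=1:
--       count+=1
--   return(count)
-- ===== SOURCE B (Python) =====
-- def count_lone_ones(n):
--     count = 0
--     run = 0  # length of the current run of consecutive 1-digits
--     for d in [int(c) for c in str(n)]:
--         if d == 1: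
--             run += 1
--         else:
--             if run == 1:
--                 count += 1
--             run = 0
--     if run == 1:
--         count += 1
--     return count
-- ===== Notes on version B (the rewrite author's own statement) =====
-- stated objective: alternative
-- what changed: Replaces A's indexed neighbour test over a sentinel-extended digit array (with a negative-index trick at i=0) by a single run-length state machine over the digits that counts runs of 1s of length exactly one.
import Mathlib
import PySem

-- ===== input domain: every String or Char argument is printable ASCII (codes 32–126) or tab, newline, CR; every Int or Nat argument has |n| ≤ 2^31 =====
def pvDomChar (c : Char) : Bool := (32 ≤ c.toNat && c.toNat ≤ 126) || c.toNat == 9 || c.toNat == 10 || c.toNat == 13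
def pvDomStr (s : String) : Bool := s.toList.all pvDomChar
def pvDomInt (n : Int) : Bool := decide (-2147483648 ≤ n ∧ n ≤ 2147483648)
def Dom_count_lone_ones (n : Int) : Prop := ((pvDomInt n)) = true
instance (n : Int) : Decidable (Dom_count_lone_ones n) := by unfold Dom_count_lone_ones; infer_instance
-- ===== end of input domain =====

-- B replaces A's indexed neighbour test over a sentinel-extended digit array by a run-length
-- state machine over the digits (objective: alternative, same cost).

-- ===== PORT A =====
def count_lone_ones (n : Int) : Int :=
  let x := PySem.Int.toChars n
  -- int(i) on a single char: exact for digit chars; on non-digit chars (only '-' of n < 0 here)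
  -- Python raises ValueError, excluded by Pre_ — the .getD 0 is a dummy there.
  let a := x.foldl (fun acc i => acc ++ [(PySem.Int.ofChars? [i]).getD 0]) ([] : List Int)
  let a2 := a ++ [0]
  (PySem.List.pyRange 0 ((a2.length : Int) - 1) 1).foldl
    (fun count i =>
      if PySem.List.pyGetD a2 i 0 = 1 ∧ PySem.List.pyGetD a2 (i + 1) 0 ≠ 1 ∧
         PySem.List.pyGetD a2 (i - 1) 0 ≠ 1
      then count + 1 else count) 0

-- ===== PORT B =====
def count_lone_ones_alt (n : Int) : Int :=
  let digits := (PySem.Int.toChars n).map (fun c => (PySem.Int.ofChars? [c]).getD 0)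
  let s := digits.foldl
    (fun (cr : Int × Int) d =>
      if d = 1 then (cr.1, cr.2 + 1)
      else (if cr.2 = 1 then cr.1 + 1 else cr.1, 0)) ((0 : Int), (0 : Int))
  if s.2 = 1 then s.1 + 1 else s.1

-- ===== PRECONDITION & SPEC =====
-- Pre_ excludes exactly the negative inputs: there str(n) starts with '-' and A's int('-') raises ValueError.
def Pre_count_lone_ones (n : Int) : Prop := 0 ≤ n
instance (n : Int) : Decidable (Pre_count_lone_ones n) := by unfold Pre_count_lone_ones; infer_instance
def pvWitness_count_lone_ones : Int := 101

def Spec_count_lone_ones (n : Int) (out : Int) : Prop := out = count_lone_ones_alt n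
instance (n : Int) (out : Int) : Decidable (Spec_count_lone_ones n out) := by unfold Spec_count_lone_ones; infer_instance

-- ===== CLAIM (what is proved, stated in full; the proofs are below) =====
def Claim_equal_count_lone_ones : Prop := ∀ (n : Int), Dom_count_lone_ones n → Pre_count_lone_ones n → Spec_count_lone_ones n (count_lone_ones n)

-- ===== LEMMAS AND PROOFS =====

-- A's per-index condition on the sentinel-extended array (abbrev: decidability is inferred).
abbrev pvCond (a : List Int) (i : Int) : Prop :=
  PySem.List.pyGetD a i 0 = 1 ∧ PySem.List.pyGetD a (i + 1) 0 ≠ 1 ∧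
  PySem.List.pyGetD a (i - 1) 0 ≠ 1

-- The digit list both ports start from.
def digitsOf (n : Int) : List Int :=
  (PySem.Int.toChars n).map (fun c => (PySem.Int.ofChars? [c]).getD 0)

-- Reference count: lone 1s of a digit list, given the previous digit p.
def loneCount (p : Int) : List Int → Int
  | [] => 0
  | d :: rest => (if d = 1 ∧ rest.headD 0 ≠ 1 ∧ p ≠ 1 then 1 else 0) + loneCount d rest

theorem getShift (x : Int) (rest : List Int) (j : Int) (hj : 0 ≤ j) :
    PySem.List.pyGetD (x :: rest) (j + 1) 0 = PySem.List.pyGetD rest j 0 := by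
  lift j to Nat using hj
  have h : ((j : Int) + 1) = ((j + 1 : Nat) : Int) := by push_cast; ring
  rw [h, PySem.List.pyGetD_natCast, PySem.List.pyGetD_natCast]
  rfl

theorem pvCond_one (p h : Int) (rest : List Int) :
    pvCond (p :: h :: rest) 1 ↔ (h = 1 ∧ rest.headD 0 ≠ 1 ∧ p ≠ 1) := by
  unfold pvCond
  rw [show ((1 : Int) + 1) = 2 by norm_num, show ((1 : Int) - 1) = 0 by norm_num,
      PySem.List.pyGetD_ofNat' _ 2, PySem.List.pyGetD_ofNat' _ 1, PySem.List.pyGetD_zero_cons]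
  cases rest <;> simp

theorem pvCond_shift (x : Int) (rest : List Int) (k : Nat) :
    pvCond (x :: rest) ((k : Int) + 1 + 1) ↔ pvCond rest ((k : Int) + 1) := by
  unfold pvCond
  rw [show ((k : Int) + 1 + 1 + 1) = ((k : Int) + 1 + 1) + 1 by ring,
      getShift x rest ((k : Int) + 1 + 1) (by positivity),
      show ((k : Int) + 1 + 1 - 1) = ((k : Int)) + 1 by ring,
      getShift x rest ((k : Int) + 1) (by positivity),
      getShift x rest ((k : Int)) (by positivity),
      show ((k : Int) + 1 - 1) = ((k : Int)) by ring]

theorem pvCond_top (d : List Int) (k : Nat) :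
    pvCond (d ++ [0]) ((k : Nat) : Int) ↔ pvCond ((0 : Int) :: (d ++ [0])) (((k : Nat) : Int) + 1) := by
  cases k with
  | zero =>
    rw [Nat.cast_zero, show ((0 : Int) + 1) = 1 by norm_num]
    cases d with
    | nil => decide
    | cons h t =>
      rw [show ((h :: t) ++ [0] : List Int) = h :: (t ++ [0]) from rfl, pvCond_one]
      unfold pvCond
      rw [show ((0 : Int) + 1) = 1 by norm_num, show ((0 : Int) - 1) = (-1 : Int) by norm_num,
          PySem.List.pyGetD_zero_cons, PySem.List.pyGetD_ofNat' _ 1,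
          show (h :: (t ++ [0]) : List Int) = (h :: t) ++ [0] from rfl,
          PySem.List.pyGetD_neg_one_append_singleton]
      cases t <;> simp
  | succ m =>
      have e : ((m + 1 : Nat) : Int) = ((m : Int) + 1) := by push_cast; ring
      rw [e, pvCond_shift]

theorem countP_shift (d : List Int) (p : Int) :
    (((List.range d.length).countP
        (fun (k : Nat) => decide (pvCond (p :: (d ++ [0])) ((k : Int) + 1)))) : Int)
      = loneCount p d := by
  induction d generalizing p with
  | nil => simp [loneCount]
  | cons h t ih =>
      rw [show (h :: t).length = t.length + 1 from rfl, List.range_succ_eq_map,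
          List.countP_cons, List.countP_map]
      have head : (decide (pvCond (p :: (h :: t ++ [0])) (1 : Int)) = true)
          ↔ (h = 1 ∧ t.headD 0 ≠ 1 ∧ p ≠ 1) := by
        rw [decide_eq_true_iff]
        rw [show (p :: (h :: t ++ [0])) = p :: h :: (t ++ [0]) from rfl, pvCond_one]
        cases t <;> simp
      have tail : (List.range t.length).countP
            ((fun (k : Nat) => decide (pvCond (p :: (h :: t ++ [0])) ((k : Int) + 1))) ∘ Nat.succ)
          = (List.range t.length).countP
            (fun (k : Nat) => decide (pvCond (h :: (t ++ [0])) ((k : Int) + 1))) := by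
        apply List.countP_congr
        intro k _
        simp only [Function.comp]
        rw [decide_eq_true_iff, decide_eq_true_iff]
        have e : ((Nat.succ k : Nat) : Int) + 1 = ((k : Int) + 1 + 1) := by push_cast; ring
        rw [e, show (p :: (h :: t ++ [0])) = p :: (h :: (t ++ [0])) from rfl, pvCond_shift]
      rw [tail]
      rw [show loneCount p (h :: t)
          = (if h = 1 ∧ t.headD 0 ≠ 1 ∧ p ≠ 1 then 1 else 0) + loneCount h t from rfl]
      rw [← ih h]
      push_cast
      by_cases hc : (h = 1 ∧ t.headD 0 ≠ 1 ∧ p ≠ 1)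
      · rw [if_pos hc, if_pos (head.mpr hc)]; ring
      · rw [if_neg hc, if_neg (fun hh => hc (head.mp hh))]; ring

-- A computes the reference count.
theorem A_eq (n : Int) : count_lone_ones n = loneCount 0 (digitsOf n) := by
  simp only [count_lone_ones]
  rw [PySem.List.foldl_append_singleton_eq_map]
  simp only [List.nil_append]
  rw [show ((PySem.Int.toChars n).map (fun c => (PySem.Int.ofChars? [c]).getD 0)) = digitsOf n
      from rfl]
  set d : List Int := digitsOf n with hd
  have hlen : (((d ++ [0]).length : Int) - 1) = (d.length : Int) := by simp
  rw [hlen, PySem.List.pyRange_one]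
  have key := PySem.List.foldl_ite_add_one (fun i => pvCond (d ++ [0]) i)
      ((List.range (((d.length : Int)) - 0).toNat).map (fun (k : Nat) => (0 : Int) + (k : Int))) 0
  simp only [pvCond] at key
  refine key.trans ?_
  rw [List.countP_map]
  have hrange : ((((d.length : Int)) - 0).toNat) = d.length := by simp
  rw [hrange, zero_add, ← countP_shift d 0, Nat.cast_inj]
  apply List.countP_congr
  intro k _
  simp only [Function.comp]
  rw [decide_eq_true_iff, decide_eq_true_iff]
  have e0 : ((0 : Int) + (k : Int)) = ((k : Nat) : Int) := by ring
  rw [e0]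
  exact pvCond_top d k

-- The run-length machine of B: step and finisher.
def mstep : Int × Int → Int → Int × Int := fun cr d =>
  if d = 1 then (cr.1, cr.2 + 1)
  else (if cr.2 = 1 then cr.1 + 1 else cr.1, 0)

def mfin (s : Int × Int) : Int := if s.2 = 1 then s.1 + 1 else s.1

theorem machine (d : List Int) :
    ∀ c : Int,
      ((∀ p : Int, p ≠ 1 → mfin (d.foldl mstep (c, 0)) = c + loneCount p d)
       ∧ (mfin (d.foldl mstep (c, 1)) = c + (if d.headD 0 ≠ 1 then 1 else 0) + loneCount 1 d)
       ∧ (∀ r : Int, 2 ≤ r → mfin (d.foldl mstep (c, r)) = c + loneCount 1 d)) := by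
  induction d with
  | nil =>
      intro c
      refine ⟨fun p _ => by simp [mfin, loneCount], ?_, fun r hr => ?_⟩
      · simp [mfin, loneCount]
      · simp [mfin, loneCount, show r ≠ 1 by omega]
  | cons h t ih =>
      intro c
      by_cases h1 : h = 1
      · subst h1
        refine ⟨fun p hp => ?_, ?_, fun r hr => ?_⟩
        · rw [show ((1 : Int) :: t).foldl mstep (c, 0) = t.foldl mstep (c, 1) by simp [mstep]]
          rw [(ih c).2.1]
          rw [show loneCount p (1 :: t)
              = (if (1 : Int) = 1 ∧ t.headD 0 ≠ 1 ∧ p ≠ 1 then 1 else 0) + loneCount 1 t from rfl]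
          by_cases ht : t.headD 0 ≠ 1
          · rw [if_pos ht, if_pos ⟨rfl, ht, hp⟩]; ring
          · rw [if_neg ht, if_neg (fun hh => ht hh.2.1)]; ring
        · rw [show ((1 : Int) :: t).foldl mstep (c, 1) = t.foldl mstep (c, 2) by
              norm_num [mstep]]
          rw [(ih c).2.2 2 le_rfl]
          rw [show loneCount 1 (1 :: t)
              = (if (1 : Int) = 1 ∧ t.headD 0 ≠ 1 ∧ (1 : Int) ≠ 1 then 1 else 0) + loneCount 1 t
              from rfl]
          simp
        · rw [show ((1 : Int) :: t).foldl mstep (c, r) = t.foldl mstep (c, r + 1) by simp [mstep]]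
          rw [(ih c).2.2 (r + 1) (by omega)]
          rw [show loneCount 1 (1 :: t)
              = (if (1 : Int) = 1 ∧ t.headD 0 ≠ 1 ∧ (1 : Int) ≠ 1 then 1 else 0) + loneCount 1 t
              from rfl]
          simp
      · refine ⟨fun p hp => ?_, ?_, fun r hr => ?_⟩
        · rw [show (h :: t).foldl mstep (c, 0) = t.foldl mstep (c, 0) by
              simp [mstep, h1]]
          rw [(ih c).1 h h1]
          rw [show loneCount p (h :: t)
              = (if h = 1 ∧ t.headD 0 ≠ 1 ∧ p ≠ 1 then 1 else 0) + loneCount h t from rfl]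
          rw [if_neg (fun hh => h1 hh.1)]
          ring
        · rw [show (h :: t).foldl mstep (c, 1) = t.foldl mstep (c + 1, 0) by
              simp [mstep, h1]]
          rw [(ih (c + 1)).1 h h1, List.headD_cons, if_pos h1]
          rw [show loneCount 1 (h :: t)
              = (if h = 1 ∧ t.headD 0 ≠ 1 ∧ (1 : Int) ≠ 1 then 1 else 0) + loneCount h t from rfl]
          rw [if_neg (fun hh => h1 hh.1)]
          ring
        · rw [show (h :: t).foldl mstep (c, r) = t.foldl mstep (c, 0) by
              simp [mstep, h1, show r ≠ 1 by omega]]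
          rw [(ih c).1 h h1]
          rw [show loneCount 1 (h :: t)
              = (if h = 1 ∧ t.headD 0 ≠ 1 ∧ (1 : Int) ≠ 1 then 1 else 0) + loneCount h t from rfl]
          rw [if_neg (fun hh => h1 hh.1)]
          ring

-- B computes the reference count.
theorem B_eq (n : Int) : count_lone_ones_alt n = loneCount 0 (digitsOf n) := by
  simp only [count_lone_ones_alt]
  have key := ((machine (digitsOf n) 0).1) 0 (by norm_num)
  rw [zero_add] at key
  exact key

-- ===== VERDICT (by name: the statement is the Claim_ definition above) =====
theorem count_lone_ones_spec : Claim_equal_count_lone_ones := by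
  intro n _ _
  show count_lone_ones n = count_lone_ones_alt n
  rw [A_eq, B_eq]
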